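-- pv_equiv track=rewrite | github.com/rajithst/binarysearch-challenges | Graph/sinking_island.py | solve
-- ===== SOURCE A (Python) =====
-- from collections import deque
--
-- def solve(board):
--     rows = len(board)
--     cols = len(board[0])
--
--     que = deque()
--     for i in range(rows):
--         for j in range(cols):
--             if 0 < j < cols - 1 and 0 < i < rows - 1:
--                 continue
--             else:
--                 if board[i][j] == 1:
--                     que.append([i, j])
--                     board[i][j] = -1
--     while que:
--         x, y = que.popleft()
--         directions = [(-1, 0), (0, 1), (1, 0), (0, -1)]
--         for xx, yy in directions:
--             newx = x + xx
--             newy = y + yy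
--             if 0 <= newx < rows and 0 <= newy < cols and board[newx][newy] == 1:
--                 que.append([newx, newy])
--                 board[newx][newy] = -1
--
--     for i in range(rows):
--         for j in range(cols):
--             if board[i][j] == 1:
--                 board[i][j] = 0
--
--             if board[i][j] == -1:
--                 board[i][j] = 1
--     return board
-- ===== SOURCE B (Python) =====
-- def solve(board):
--     rows, cols = len(board), len(board[0])
--     stack = [(i, j) for i in range(rows) for j in range(cols)
--              if i == 0 or i == rows - 1 or j == 0 or j == cols - 1]
--     while stack:
--         x, y = stack.pop()
--         if 0 <= x < rows and 0 <= y < cols and board[x][y] == 1: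
--             board[x][y] = -1
--             stack += ((x + 1, y), (x - 1, y), (x, y + 1), (x, y - 1))
--     for row in board:
--         for j in range(cols):
--             if row[j] == 1:
--                 row[j] = 0
--             elif row[j] == -1:
--                 row[j] = 1
--     return board
-- ===== Notes on version B (the rewrite author's own statement) =====
-- stated objective: alternative
-- what changed: Replaces A's two-pass seeding (full-grid scan that skips interior cells, marks border 1-cells and enqueues them) plus deque BFS with a mark-before-push guard by a single stack-based DFS: one comprehension pushes every border coordinate unvalidated and the loop validates each cell on pop (bounds and value), marking it and pushing its four neighbours; the final relabel sweep stays. Pre_ excludes exactly the boards on which A raises IndexError (the empty board and boards with a row shorter than row 0).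
import Mathlib
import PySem

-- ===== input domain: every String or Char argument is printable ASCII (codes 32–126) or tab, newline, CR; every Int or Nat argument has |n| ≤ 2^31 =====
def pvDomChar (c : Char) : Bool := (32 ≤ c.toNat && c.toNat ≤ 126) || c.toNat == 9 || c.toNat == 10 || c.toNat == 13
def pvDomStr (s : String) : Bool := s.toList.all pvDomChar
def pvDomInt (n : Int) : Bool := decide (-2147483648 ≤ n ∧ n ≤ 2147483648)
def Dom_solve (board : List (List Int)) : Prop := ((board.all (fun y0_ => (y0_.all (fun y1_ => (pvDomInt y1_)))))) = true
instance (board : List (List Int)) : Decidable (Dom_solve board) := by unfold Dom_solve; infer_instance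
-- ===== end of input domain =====

-- B replaces A's two-pass border seeding plus mark-before-push deque BFS by a single
-- stack-based DFS: every border coordinate is pushed unvalidated and each cell is validated
-- on pop; the final relabel sweep stays. Both A and B mutate `board` in place in Python and
-- return it; the equivalence proved here is about the return value.

-- ===== PORT A =====
-- cell read board[i][j] (indices known in range under Pre_), single-cell write
def vAt (b : List (List Int)) (p : Nat × Nat) : Int := (b.getD p.1 []).getD p.2 0

def mark1 (b : List (List Int)) (p : Nat × Nat) (v : Int) : List (List Int) :=
  b.modify p.1 (fun row => row.set p.2 v)

def dirs : List (Int × Int) := [(-1, 0), (0, 1), (1, 0), (0, -1)]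

-- the (i, j) pairs of the two nested `for` loops, i-major
def allPairs (rows cols : Nat) : List (Nat × Nat) :=
  (List.range rows).flatMap (fun i => (List.range cols).map (fun j => (i, j)))

def onesCount (b : List (List Int)) : Nat := (b.map (fun row => row.count 1)).sum

-- A's border-seeding double loop: skip interior cells, mark border 1-cells and enqueue them
def seedA (rows cols : Nat) (l : List (Nat × Nat)) (st : List (List Int) × List (Nat × Nat)) :
    List (List Int) × List (Nat × Nat) :=
  l.foldl (fun st p =>
    if 0 < p.2 ∧ p.2 < cols - 1 ∧ 0 < p.1 ∧ p.1 < rows - 1 then st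
    else if vAt st.1 p = 1 then (mark1 st.1 p (-1), st.2 ++ [p]) else st) st

-- one direction probe of A's BFS inner loop
def tryA (rows cols x y : Nat) (st : List (List Int) × List (Nat × Nat)) (d : Int × Int) :
    List (List Int) × List (Nat × Nat) :=
  let nx : Int := (x : Int) + d.1
  let ny : Int := (y : Int) + d.2
  if 0 ≤ nx ∧ nx < (rows : Int) ∧ 0 ≤ ny ∧ ny < (cols : Int) ∧ vAt st.1 (nx.toNat, ny.toNat) = 1
  then (mark1 st.1 (nx.toNat, ny.toNat) (-1), st.2 ++ [(nx.toNat, ny.toNat)])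
  else st

-- lemmas needed by bfsA's termination measure
theorem vAt_ne_zero_bounds (b : List (List Int)) (p : Nat × Nat) (h : vAt b p ≠ 0) :
    p.1 < b.length ∧ p.2 < (b.getD p.1 []).length := by
  unfold vAt at h
  have h1 : p.1 < b.length := by
    by_contra hb
    have : b.getD p.1 [] = [] := by
      rw [List.getD_eq_getElem?_getD, List.getElem?_eq_none (by omega)]; rfl
    rw [this] at h
    simp at h
  refine ⟨h1, ?_⟩
  by_contra hb
  rw [List.getD_eq_getElem?_getD (l := b.getD p.1 []), List.getElem?_eq_none (by omega)] at h
  simp at h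

theorem sum_map_count_set (b : List (List Int)) (i : Nat) (r : List Int) (h : i < b.length) :
    ((b.set i r).map (fun row => row.count 1)).sum + b[i].count 1 =
      (b.map (fun row => row.count 1)).sum + r.count 1 := by
  induction b generalizing i with
  | nil => simp at h
  | cons a l ih =>
    cases i with
    | zero => simp [List.set]; omega
    | succ n =>
      simp only [List.set, List.map_cons, List.sum_cons, List.getElem_cons_succ]
      have := ih n (by simpa using h)
      omega

theorem ones_mark1 (b : List (List Int)) (p : Nat × Nat) (h : vAt b p = 1) :
    onesCount (mark1 b p (-1)) + 1 = onesCount b := by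
  obtain ⟨h1, h2⟩ := vAt_ne_zero_bounds b p (by rw [h]; decide)
  unfold mark1 onesCount
  rw [List.modify_eq_set]
  have hrow : b[p.1]?.getD default = b.getD p.1 [] := by
    rw [List.getD_eq_getElem?_getD]; rfl
  rw [hrow]
  set row := b.getD p.1 [] with hr
  have hget : b[p.1] = row := by
    rw [hr, List.getD_eq_getElem?_getD, List.getElem?_eq_getElem h1]; rfl
  have hcnt : (row.set p.2 (-1)).count 1 + 1 = row.count 1 := by
    have hrv : row[p.2] = 1 := by
      have h' := h; unfold vAt at h'
      rw [← hr] at h'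
      rw [List.getD_eq_getElem?_getD, List.getElem?_eq_getElem h2] at h'
      simpa using h'
    have hcs := List.count_set (a := (-1 : Int)) (b := (1 : Int)) (l := row) (i := p.2) h2
    rw [hrv] at hcs
    simp at hcs
    have hpos : 0 < row.count 1 := by
      have : (1 : Int) ∈ row := by rw [← hrv]; exact List.getElem_mem h2
      exact List.count_pos_iff.mpr this
    omega
  have := sum_map_count_set b p.1 (row.set p.2 (-1)) h1
  rw [hget] at this
  omega

theorem tryA_ones (rows cols x y : Nat) (ds : List (Int × Int)) (b : List (List Int))
    (acc : List (Nat × Nat)) :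
    ∃ ex, (ds.foldl (tryA rows cols x y) (b, acc)).2 = acc ++ ex ∧
      onesCount ((ds.foldl (tryA rows cols x y) (b, acc)).1) + ex.length ≤ onesCount b := by
  induction ds generalizing b acc with
  | nil => exact ⟨[], by simp⟩
  | cons d ds ih =>
    simp only [List.foldl_cons]
    by_cases hg : 0 ≤ (x : Int) + d.1 ∧ (x : Int) + d.1 < (rows : Int) ∧ 0 ≤ (y : Int) + d.2 ∧
        (y : Int) + d.2 < (cols : Int) ∧ vAt b (((x : Int) + d.1).toNat, ((y : Int) + d.2).toNat) = 1
    · rw [show tryA rows cols x y (b, acc) d =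
        (mark1 b (((x : Int)+d.1).toNat, ((y : Int)+d.2).toNat) (-1),
          acc ++ [(((x : Int)+d.1).toNat, ((y : Int)+d.2).toNat)]) from by
          unfold tryA; simp only []; rw [if_pos hg]]
      obtain ⟨ex, h1, h2⟩ := ih (mark1 b (((x : Int)+d.1).toNat, ((y : Int)+d.2).toNat) (-1))
        (acc ++ [(((x : Int)+d.1).toNat, ((y : Int)+d.2).toNat)])
      refine ⟨(((x : Int)+d.1).toNat, ((y : Int)+d.2).toNat) :: ex, by simpa using h1, ?_⟩
      have := ones_mark1 b (((x : Int)+d.1).toNat, ((y : Int)+d.2).toNat) hg.2.2.2.2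
      simp only [List.length_cons]
      omega
    · rw [show tryA rows cols x y (b, acc) d = (b, acc) from by
        unfold tryA; simp only []; rw [if_neg hg]]
      exact ih b acc

def bfsA (rows cols : Nat) (b : List (List Int)) (q : List (Nat × Nat)) : List (List Int) :=
  match q with
  | [] => b
  | (x, y) :: rest =>
    let st := dirs.foldl (tryA rows cols x y) (b, [])
    bfsA rows cols st.1 (rest ++ st.2)
termination_by 5 * onesCount b + q.length
decreasing_by
  obtain ⟨ex, h1, h2⟩ := tryA_ones rows cols x y dirs b []
  simp only [List.nil_append] at h1
  simp [h1]
  omega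

-- A's final relabel double loop (1 → 0, then -1 → 1)
def finA (rows cols : Nat) (b : List (List Int)) : List (List Int) :=
  (allPairs rows cols).foldl (fun b p =>
    let b1 := if vAt b p = 1 then mark1 b p 0 else b
    if vAt b1 p = -1 then mark1 b1 p 1 else b1) b

def solve (board : List (List Int)) : List (List Int) :=
  let rows := board.length
  let cols := board.headI.length
  let st := seedA rows cols (allPairs rows cols) (board, [])
  finA rows cols (bfsA rows cols st.1 st.2)

-- ===== PORT B =====
-- stack = [(i, j) for i in range(rows) for j in range(cols) if i/j on the border]
def borderSeeds (rows cols : Nat) : List (Int × Int) :=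
  (PySem.List.pyRange 0 rows 1).flatMap (fun i =>
    (PySem.List.pyRange 0 cols 1).flatMap (fun j =>
      if i = 0 ∨ i = (rows : Int) - 1 ∨ j = 0 ∨ j = (cols : Int) - 1 then [(i, j)] else []))

-- while stack: pop; validate bounds and value on pop; mark -1; push the four neighbours
-- (stack top at the head; Python pops from the end, so the initial list is reversed and
-- pushed neighbours are prepended in reverse push order)
def fillLoop (rows cols : Nat) (b : List (List Int)) (stack : List (Int × Int)) :
    List (List Int) :=
  match stack with
  | [] => b
  | c :: rest =>
    if h : 0 ≤ c.1 ∧ c.1 < (rows : Int) ∧ 0 ≤ c.2 ∧ c.2 < (cols : Int) ∧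
        vAt b (c.1.toNat, c.2.toNat) = 1 then
      fillLoop rows cols (mark1 b (c.1.toNat, c.2.toNat) (-1))
        ([(c.1, c.2 - 1), (c.1, c.2 + 1), (c.1 - 1, c.2), (c.1 + 1, c.2)] ++ rest)
    else fillLoop rows cols b rest
termination_by 5 * onesCount b + stack.length
decreasing_by
  all_goals
    first
      | (have h1 := ones_mark1 b (c.1.toNat, c.2.toNat) h.2.2.2.2
         simp only [List.length_append, List.length_cons, List.length_nil]
         omega)
      | (simp only [List.length_cons]; omega)

-- for row in board: for j in range(cols): 1 -> 0, elif -1 -> 1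
def sweepRow (cols : Nat) (row : List Int) : List Int :=
  (List.range cols).foldl (fun r j =>
    if r.getD j 0 = 1 then r.set j 0
    else if r.getD j 0 = -1 then r.set j 1 else r) row

def solve_alt (board : List (List Int)) : List (List Int) :=
  let rows := board.length
  let cols := board.headI.length
  let b2 := fillLoop rows cols board (borderSeeds rows cols).reverse
  b2.map (sweepRow cols)

-- ===== PRECONDITION & SPEC =====
-- Pre_ excludes exactly the inputs on which the Python A raises IndexError: the empty board
-- (board[0]) and boards where some row is shorter than row 0 (board[i][j] with j out of range).
def Pre_solve (board : List (List Int)) : Prop :=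
  board ≠ [] ∧ ∀ row ∈ board, board.headI.length ≤ row.length
instance (board : List (List Int)) : Decidable (Pre_solve board) := by
  unfold Pre_solve; infer_instance

def pvWitness_solve : List (List Int) := [[1, 0], [0, 1]]

def Spec_solve (board : List (List Int)) (out : List (List Int)) : Prop := out = solve_alt board
instance (board : List (List Int)) (out : List (List Int)) : Decidable (Spec_solve board out) := by
  unfold Spec_solve; infer_instance

-- ===== CLAIM (what is proved, stated in full; the proofs are below) =====
def Claim_equal_solve : Prop := ∀ (board : List (List Int)),
  Dom_solve board → Pre_solve board → Spec_solve board (solve board)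

-- ===== LEMMAS AND PROOFS =====

-- ---------- cell-level view of boards ----------

def cell? (b : List (List Int)) (p : Nat × Nat) : Option Int :=
  b[p.1]?.bind (fun row => row[p.2]?)

theorem vAt_eq_cell? (b : List (List Int)) (p : Nat × Nat) :
    vAt b p = (cell? b p).getD 0 := by
  unfold vAt cell?
  rw [List.getD_eq_getElem?_getD, List.getD_eq_getElem?_getD]
  cases h : b[p.1]? with
  | none => simp
  | some row => simp

theorem cell?_isSome_of_vAt_ne (b : List (List Int)) (p : Nat × Nat) (h : vAt b p ≠ 0) :
    cell? b p = some (vAt b p) := by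
  rw [vAt_eq_cell?] at h ⊢
  cases hc : cell? b p with
  | none => rw [hc] at h; simp at h
  | some w => simp

theorem board_ext (b1 b2 : List (List Int))
    (hs : ∀ i : Nat, (b1[i]?).map List.length = (b2[i]?).map List.length)
    (hc : ∀ q, cell? b1 q = cell? b2 q) : b1 = b2 := by
  apply List.ext_getElem?
  intro i
  cases h1 : b1[i]? with
  | none =>
    cases h2 : b2[i]? with
    | none => rfl
    | some r2 => have := hs i; rw [h1, h2] at this; simp at this
  | some r1 =>
    cases h2 : b2[i]? with
    | none => have := hs i; rw [h1, h2] at this; simp at this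
    | some r2 =>
      have hlen : r1.length = r2.length := by
        have := hs i; rw [h1, h2] at this; simpa using this
      congr 1
      apply List.ext_getElem?
      intro j
      have := hc (i, j)
      unfold cell? at this
      rw [h1, h2] at this
      simpa using this

theorem shape_mark1 (b : List (List Int)) (p : Nat × Nat) (v : Int) (i : Nat) :
    ((mark1 b p v)[i]?).map List.length = (b[i]?).map List.length := by
  unfold mark1
  rw [List.getElem?_modify]
  cases h : b[i]? with
  | none => rfl
  | some r =>
    rw [show ((fun a => if p.1 = i then a.set p.2 v else a) <$> some r) =
      some (if p.1 = i then r.set p.2 v else r) from rfl]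
    simp only [Option.map_some]
    split <;> simp [List.length_set]

theorem cell?_mark1 (b : List (List Int)) (p : Nat × Nat) (v : Int) (q : Nat × Nat) :
    cell? (mark1 b p v) q = if p = q then (cell? b q).map (fun _ => v) else cell? b q := by
  unfold cell? mark1
  rw [List.getElem?_modify]
  cases h : b[q.1]? with
  | none => split <;> simp
  | some r =>
    rw [show ((fun a => if p.1 = q.1 then a.set p.2 v else a) <$> some r) =
      some (if p.1 = q.1 then r.set p.2 v else r) from rfl]
    simp only [Option.bind_some]
    by_cases h1 : p.1 = q.1
    · simp only [if_pos h1]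
      rw [List.getElem?_set]
      by_cases h2 : p.2 = q.2
      · have hpq : p = q := Prod.ext h1 h2
        rw [if_pos h2, if_pos hpq, ← h2]
        by_cases hl : p.2 < r.length
        · rw [if_pos hl, List.getElem?_eq_getElem hl]; simp
        · rw [if_neg hl, List.getElem?_eq_none (by omega)]; simp
      · have hpq : p ≠ q := fun e => h2 (by rw [e])
        rw [if_neg h2, if_neg hpq]
    · have hpq : p ≠ q := fun e => h1 (by rw [e])
      simp only [if_neg h1, if_neg hpq]

-- classical cellwise marking of a set of positions with -1 (spec-level only)
noncomputable def markSet (b : List (List Int)) (S : Nat × Nat → Prop) : List (List Int) :=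
  b.mapIdx (fun i row => row.mapIdx (fun j v =>
    @ite _ (S (i, j)) (Classical.propDecidable _) (-1) v))

theorem shape_markSet (b : List (List Int)) (S : Nat × Nat → Prop) (i : Nat) :
    ((markSet b S)[i]?).map List.length = (b[i]?).map List.length := by
  unfold markSet
  rw [List.getElem?_mapIdx]
  cases h : b[i]? <;> simp

theorem cell?_markSet (b : List (List Int)) (S : Nat × Nat → Prop) (q : Nat × Nat) :
    cell? (markSet b S) q =
      (cell? b q).map (fun w => @ite _ (S q) (Classical.propDecidable _) (-1) w) := by
  unfold cell? markSet
  rw [List.getElem?_mapIdx]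
  cases h : b[q.1]? with
  | none => simp
  | some r =>
    simp only [Option.map_some, Option.bind_some, List.getElem?_mapIdx]

theorem markSet_congr (b : List (List Int)) (S T : Nat × Nat → Prop)
    (h : ∀ p, S p ↔ T p) : markSet b S = markSet b T := by
  have : S = T := funext (fun p => propext (h p))
  rw [this]

theorem markSet_false (b : List (List Int)) (S : Nat × Nat → Prop) (h : ∀ p, ¬ S p) :
    markSet b S = b := by
  apply board_ext
  · exact shape_markSet b S
  · intro q
    rw [cell?_markSet]
    cases hc : cell? b q with
    | none => simp
    | some w => simp [h q]

theorem markSet_markSet (b : List (List Int)) (S T : Nat × Nat → Prop) :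
    markSet (markSet b S) T = markSet b (fun p => T p ∨ S p) := by
  apply board_ext
  · intro i; rw [shape_markSet, shape_markSet, shape_markSet]
  · intro q
    rw [cell?_markSet, cell?_markSet, cell?_markSet]
    cases hc : cell? b q with
    | none => simp
    | some w =>
      simp only [Option.map_some, Option.some.injEq]
      by_cases hT : T q
      · simp [hT]
      · by_cases hS : S q <;> simp [hT, hS]

theorem markSet_absorb_mark1 (b : List (List Int)) (c : Nat × Nat) (S : Nat × Nat → Prop)
    (hc : S c) : markSet (mark1 b c (-1)) S = markSet b S := by
  apply board_ext
  · intro i; rw [shape_markSet, shape_markSet, shape_mark1]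
  · intro q
    rw [cell?_markSet, cell?_markSet, cell?_mark1]
    by_cases hq : c = q
    · subst hq
      cases hc2 : cell? b c <;> simp [hc]
    · rw [if_neg hq]

theorem markSet_snoc (b : List (List Int)) (l : List (Nat × Nat)) (c : Nat × Nat) :
    markSet b (fun p => p ∈ l ++ [c]) = mark1 (markSet b (fun p => p ∈ l)) c (-1) := by
  apply board_ext
  · intro i; rw [shape_markSet, shape_mark1, shape_markSet]
  · intro q
    rw [cell?_markSet, cell?_mark1, cell?_markSet]
    by_cases hq : c = q
    · subst hq
      cases hc2 : cell? b c <;> simp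
    · rw [if_neg hq]
      have : (q ∈ l ++ [c]) ↔ (q ∈ l) := by
        simp only [List.mem_append, List.mem_singleton]
        constructor
        · rintro (h | rfl); exact h; exact absurd rfl hq
        · exact fun h => Or.inl h
      cases hc2 : cell? b q <;> simp [this]

theorem markSet_drop (b : List (List Int)) (z : Nat × Nat) (S : Nat × Nat → Prop)
    (hz : vAt b z = -1) : markSet b (fun p => p = z ∨ S p) = markSet b S := by
  apply board_ext
  · intro i; rw [shape_markSet, shape_markSet]
  · intro q
    rw [cell?_markSet, cell?_markSet]
    by_cases hq : q = z
    · subst hq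
      have := cell?_isSome_of_vAt_ne b q (by rw [hz]; decide)
      rw [this, hz]
      by_cases hS : S q <;> simp [hS]
    · cases hc : cell? b q with
      | none => simp
      | some w =>
        simp only [Option.map_some, Option.some.injEq]
        by_cases hS : S q <;> simp [hq, hS]

theorem vAt_markSet_mem (b : List (List Int)) (S : Nat × Nat → Prop) (p : Nat × Nat)
    (hS : S p) (h0 : vAt b p ≠ 0) : vAt (markSet b S) p = -1 := by
  rw [vAt_eq_cell?, cell?_markSet, cell?_isSome_of_vAt_ne b p h0]
  simp [hS]

theorem ones_markSet (b : List (List Int)) (S : Nat × Nat → Prop) (p : Nat × Nat) :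
    vAt (markSet b S) p = 1 ↔ vAt b p = 1 ∧ ¬ S p := by
  rw [vAt_eq_cell?, cell?_markSet, vAt_eq_cell?]
  cases hc : cell? b p with
  | none => simp
  | some w =>
    simp only [Option.map_some, Option.getD_some]
    by_cases hS : S p <;> simp [hS]

theorem vAt_mark1_ne (b : List (List Int)) (c : Nat × Nat) (v : Int) (p : Nat × Nat)
    (h : p ≠ c) : vAt (mark1 b c v) p = vAt b p := by
  rw [vAt_eq_cell?, cell?_mark1, if_neg (fun hh => h hh.symm), vAt_eq_cell?]

theorem vAt_mark1_self (b : List (List Int)) (c : Nat × Nat) (v : Int)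
    (h0 : vAt b c ≠ 0) : vAt (mark1 b c v) c = v := by
  rw [vAt_eq_cell?, cell?_mark1, if_pos rfl, cell?_isSome_of_vAt_ne b c h0]
  simp

theorem ones_mark1_iff (b : List (List Int)) (c : Nat × Nat) (p : Nat × Nat) :
    vAt (mark1 b c (-1)) p = 1 ↔ vAt b p = 1 ∧ p ≠ c := by
  by_cases h : p = c
  · subst h
    rw [vAt_eq_cell?, cell?_mark1, if_pos rfl]
    cases hc : cell? b p <;> simp
  · rw [vAt_mark1_ne b c _ p h]
    simp [h]


-- ---------- reachability through 1-cells (A side, Nat coordinates) ----------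

def Nbr (p q : Nat × Nat) : Prop :=
  (q.1 = p.1 + 1 ∧ q.2 = p.2) ∨ (q.1 + 1 = p.1 ∧ q.2 = p.2) ∨
  (q.2 = p.2 + 1 ∧ q.1 = p.1) ∨ (q.2 + 1 = p.2 ∧ q.1 = p.1)

inductive Rch (rows cols : Nat) (b : List (List Int)) (s : Nat × Nat) : (Nat × Nat) → Prop
  | refl : Rch rows cols b s s
  | step {q r : Nat × Nat} : Rch rows cols b s q → Nbr q r → r.1 < rows → r.2 < cols →
      vAt b r = 1 → Rch rows cols b s r

def RS (rows cols : Nat) (b : List (List Int)) (seeds : List (Nat × Nat))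
    (d : Nat × Nat) : Prop :=
  ∃ s ∈ seeds, Rch rows cols b s d

theorem Rch_mono (rows cols : Nat) (b b' : List (List Int))
    (hm : ∀ p, vAt b' p = 1 → vAt b p = 1) {s d : Nat × Nat}
    (h : Rch rows cols b' s d) : Rch rows cols b s d := by
  induction h with
  | refl => exact Rch.refl
  | step h1 h2 h3 h4 h5 ih => exact Rch.step ih h2 h3 h4 (hm _ h5)

theorem Rch_trans (rows cols : Nat) (b : List (List Int)) {s m d : Nat × Nat}
    (h1 : Rch rows cols b s m) (h2 : Rch rows cols b m d) : Rch rows cols b s d := by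
  induction h2 with
  | refl => exact h1
  | step h2' h3 h4 h5 h6 ih => exact Rch.step ih h3 h4 h5 h6

theorem Rch_block (rows cols : Nat) (b b' : List (List Int)) (c : Nat × Nat)
    (hm : ∀ p, p ≠ c → vAt b p = 1 → vAt b' p = 1) {s d : Nat × Nat}
    (h : Rch rows cols b s d) : Rch rows cols b' s d ∨ Rch rows cols b' c d := by
  induction h with
  | refl => exact Or.inl Rch.refl
  | @step q r h1 h2 h3 h4 h5 ih =>
    by_cases hrc : r = c
    · subst hrc; exact Or.inr Rch.refl
    · rcases ih with ih | ih
      · exact Or.inl (Rch.step ih h2 h3 h4 (hm r hrc h5))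
      · exact Or.inr (Rch.step ih h2 h3 h4 (hm r hrc h5))

theorem Rch_first (rows cols : Nat) (b : List (List Int)) {x d : Nat × Nat}
    (h : Rch rows cols b x d) :
    d = x ∨ ∃ c, Nbr x c ∧ c.1 < rows ∧ c.2 < cols ∧ vAt b c = 1 ∧ Rch rows cols b c d := by
  induction h with
  | refl => exact Or.inl rfl
  | @step q r h1 h2 h3 h4 h5 ih =>
    rcases ih with rfl | ⟨c, hc1, hc2, hc3, hc4, hc5⟩
    · exact Or.inr ⟨r, h2, h3, h4, h5, Rch.refl⟩
    · exact Or.inr ⟨c, hc1, hc2, hc3, hc4, Rch.step hc5 h2 h3 h4 h5⟩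

theorem RS_absorb (rows cols : Nat) (b b' : List (List Int)) (S : List (Nat × Nat))
    (x c : Nat × Nat) (hx : x ∈ S) (hnb : Nbr x c) (hb1 : c.1 < rows) (hb2 : c.2 < cols)
    (h1 : vAt b c = 1)
    (hm1 : ∀ p, p ≠ c → vAt b p = 1 → vAt b' p = 1)
    (hm2 : ∀ p, vAt b' p = 1 → vAt b p = 1) (d : Nat × Nat) :
    RS rows cols b S d ↔ RS rows cols b' (S ++ [c]) d := by
  constructor
  · rintro ⟨s, hs, hr⟩
    rcases Rch_block rows cols b b' c hm1 hr with h | h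
    · exact ⟨s, by simp [hs], h⟩
    · exact ⟨c, by simp, h⟩
  · rintro ⟨s, hs, hr⟩
    have hr' := Rch_mono rows cols b b' hm2 hr
    rcases List.mem_append.mp hs with hs | hs
    · exact ⟨s, hs, hr'⟩
    · have : s = c := by simpa using hs
      subst this
      exact ⟨x, hx, Rch_trans rows cols b (Rch.step Rch.refl hnb hb1 hb2 h1) hr'⟩

theorem RS_terminal (rows cols : Nat) (b : List (List Int)) (x : Nat × Nat)
    (M : List (Nat × Nat))
    (hno : ∀ c, Nbr x c → c.1 < rows → c.2 < cols → vAt b c ≠ 1) (d : Nat × Nat) :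
    RS rows cols b (x :: M) d ↔ d = x ∨ RS rows cols b M d := by
  constructor
  · rintro ⟨s, hs, hr⟩
    rcases List.mem_cons.mp hs with rfl | hs
    · rcases Rch_first rows cols b hr with rfl | ⟨c, hc1, hc2, hc3, hc4, _⟩
      · exact Or.inl rfl
      · exact absurd hc4 (hno c hc1 hc2 hc3)
    · exact Or.inr ⟨s, hs, hr⟩
  · rintro (rfl | ⟨s, hs, hr⟩)
    · exact ⟨d, List.mem_cons_self, Rch.refl⟩
    · exact ⟨s, List.mem_cons_of_mem x hs, hr⟩

theorem cand_nbr (rows cols x y : Nat) (d : Int × Int) (hd : d ∈ dirs)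
    (h1 : 0 ≤ (x : Int) + d.1) (h2 : (x : Int) + d.1 < (rows : Int))
    (h3 : 0 ≤ (y : Int) + d.2) (h4 : (y : Int) + d.2 < (cols : Int)) :
    Nbr (x, y) (((x : Int) + d.1).toNat, ((y : Int) + d.2).toNat) ∧
      ((x : Int) + d.1).toNat < rows ∧ ((y : Int) + d.2).toNat < cols := by
  unfold dirs at hd
  unfold Nbr
  simp only [List.mem_cons, List.not_mem_nil, or_false] at hd
  rcases hd with rfl | rfl | rfl | rfl <;>
    refine ⟨?_, by omega, by omega⟩ <;> simp only [] <;> omega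

theorem nbr_cand (rows cols x y : Nat) (c : Nat × Nat) (hnb : Nbr (x, y) c)
    (h1 : c.1 < rows) (h2 : c.2 < cols) :
    ∃ d ∈ dirs, 0 ≤ (x : Int) + d.1 ∧ (x : Int) + d.1 < (rows : Int) ∧
      0 ≤ (y : Int) + d.2 ∧ (y : Int) + d.2 < (cols : Int) ∧
      (((x : Int) + d.1).toNat, ((y : Int) + d.2).toNat) = c := by
  unfold Nbr at hnb
  rcases hnb with ⟨ha, hb⟩ | ⟨ha, hb⟩ | ⟨ha, hb⟩ | ⟨ha, hb⟩
  · exact ⟨(1, 0), by simp [dirs], by omega, by omega, by omega, by omega,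
      Prod.ext (by simp; omega) (by simp; omega)⟩
  · exact ⟨(-1, 0), by simp [dirs], by omega, by omega, by omega, by omega,
      Prod.ext (by simp; omega) (by simp; omega)⟩
  · exact ⟨(0, 1), by simp [dirs], by omega, by omega, by omega, by omega,
      Prod.ext (by simp; omega) (by simp; omega)⟩
  · exact ⟨(0, -1), by simp [dirs], by omega, by omega, by omega, by omega,
      Prod.ext (by simp; omega) (by simp; omega)⟩


-- ---------- BFS loop characterization (A) ----------

theorem innerA (rows cols x y : Nat) (ds : List (Int × Int)) (hds : ∀ d ∈ ds, d ∈ dirs) :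
    ∀ (b : List (List Int)) (acc : List (Nat × Nat)),
      vAt b (x, y) = -1 → (∀ p ∈ acc, vAt b p = -1) →
      (∀ (L : List (Nat × Nat)), (x, y) ∈ L →
        markSet (ds.foldl (tryA rows cols x y) (b, acc)).1
          (RS rows cols (ds.foldl (tryA rows cols x y) (b, acc)).1
            (L ++ (ds.foldl (tryA rows cols x y) (b, acc)).2)) =
        markSet b (RS rows cols b (L ++ acc))) ∧
      (∀ p, vAt b p = -1 → vAt (ds.foldl (tryA rows cols x y) (b, acc)).1 p = -1) ∧
      (∀ p, vAt (ds.foldl (tryA rows cols x y) (b, acc)).1 p = 1 → vAt b p = 1) ∧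
      (∀ p ∈ (ds.foldl (tryA rows cols x y) (b, acc)).2,
        vAt (ds.foldl (tryA rows cols x y) (b, acc)).1 p = -1) ∧
      (∀ d ∈ ds, 0 ≤ (x : Int) + d.1 → (x : Int) + d.1 < (rows : Int) →
        0 ≤ (y : Int) + d.2 → (y : Int) + d.2 < (cols : Int) →
        vAt (ds.foldl (tryA rows cols x y) (b, acc)).1
          (((x : Int) + d.1).toNat, ((y : Int) + d.2).toNat) ≠ 1) := by
  induction ds with
  | nil =>
    intro b acc hxy hacc
    refine ⟨fun L hL => rfl, fun p h => h, fun p h => h, hacc, by simp⟩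
  | cons d ds ih =>
    intro b acc hxy hacc
    have hds' : ∀ d' ∈ ds, d' ∈ dirs := fun d' h => hds d' (List.mem_cons_of_mem d h)
    simp only [List.foldl_cons]
    by_cases hg : 0 ≤ (x : Int) + d.1 ∧ (x : Int) + d.1 < (rows : Int) ∧ 0 ≤ (y : Int) + d.2 ∧
        (y : Int) + d.2 < (cols : Int) ∧ vAt b (((x : Int) + d.1).toNat, ((y : Int) + d.2).toNat) = 1
    · set c : Nat × Nat := (((x : Int) + d.1).toNat, ((y : Int) + d.2).toNat) with hc
      have hstep : tryA rows cols x y (b, acc) d = (mark1 b c (-1), acc ++ [c]) := by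
        unfold tryA; simp only []; rw [if_pos hg]
      rw [hstep]
      obtain ⟨hnb, hb1, hb2⟩ := cand_nbr rows cols x y d (hds d List.mem_cons_self)
        hg.1 hg.2.1 hg.2.2.1 hg.2.2.2.1
      rw [← hc] at hnb
      have h1 : vAt b c = 1 := hg.2.2.2.2
      have hxyc : (x, y) ≠ c := by
        intro h; rw [← h] at h1; rw [hxy] at h1; exact absurd h1 (by decide)
      have hxy' : vAt (mark1 b c (-1)) (x, y) = -1 := by
        rw [vAt_mark1_ne b c _ _ hxyc]; exact hxy
      have hacc' : ∀ p ∈ acc ++ [c], vAt (mark1 b c (-1)) p = -1 := by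
        intro p hp
        rcases List.mem_append.mp hp with hp | hp
        · have hpc : p ≠ c := by
            intro h
            have hv := hacc p hp
            rw [h, h1] at hv
            exact absurd hv (by decide)
          rw [vAt_mark1_ne b c _ _ hpc]; exact hacc p hp
        · have hpc2 : p = c := by simpa using hp
          rw [hpc2]
          exact vAt_mark1_self b c _ (by rw [h1]; decide)
      obtain ⟨C1, C2, C3, C4, C5⟩ := ih hds' (mark1 b c (-1)) (acc ++ [c]) hxy' hacc'
      refine ⟨?_, ?_, ?_, C4, ?_⟩
      · intro L hL
        rw [C1 L hL]
        have habs := RS_absorb rows cols b (mark1 b c (-1)) (L ++ acc) (x, y) c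
          (List.mem_append.mpr (Or.inl hL)) hnb hb1 hb2 h1
          (fun p hpc hp1 => by rw [vAt_mark1_ne b c _ _ hpc]; exact hp1)
          (fun p hp1 => ((ones_mark1_iff b c p).mp hp1).1)
        have hassoc : L ++ (acc ++ [c]) = (L ++ acc) ++ [c] := by rw [List.append_assoc]
        rw [hassoc]
        rw [markSet_congr (mark1 b c (-1)) _ _ (fun dd => (habs dd).symm)]
        apply markSet_absorb_mark1
        exact ⟨(x, y), List.mem_append.mpr (Or.inl hL), Rch.step Rch.refl hnb hb1 hb2 h1⟩
      · intro p hp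
        apply C2
        by_cases hpc : p = c
        · subst hpc; rw [hp] at h1; exact absurd h1 (by decide)
        · rw [vAt_mark1_ne b c _ _ hpc]; exact hp
      · intro p hp
        exact ((ones_mark1_iff b c p).mp (C3 p hp)).1
      · intro d' hd' hg1 hg2 hg3 hg4
        rcases List.mem_cons.mp hd' with rfl | hd'
        · intro hone
          have := C3 _ hone
          rw [← hc] at this
          have hcm : vAt (mark1 b c (-1)) c = -1 := vAt_mark1_self b c _ (by rw [h1]; decide)
          rw [hcm] at this; exact absurd this (by decide)
        · exact C5 d' hd' hg1 hg2 hg3 hg4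
    · have hstep : tryA rows cols x y (b, acc) d = (b, acc) := by
        unfold tryA; simp only []; rw [if_neg hg]
      rw [hstep]
      obtain ⟨C1, C2, C3, C4, C5⟩ := ih hds' b acc hxy hacc
      refine ⟨C1, C2, C3, C4, ?_⟩
      intro d' hd' hg1 hg2 hg3 hg4
      rcases List.mem_cons.mp hd' with rfl | hd'
      · intro hone
        have hb1 := C3 _ hone
        exact hg ⟨hg1, hg2, hg3, hg4, hb1⟩
      · exact C5 d' hd' hg1 hg2 hg3 hg4

theorem bfsA_spec (rows cols : Nat) :
    ∀ (n : Nat) (b : List (List Int)) (q : List (Nat × Nat)),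
      5 * onesCount b + q.length ≤ n →
      (∀ p ∈ q, vAt b p = -1) →
      bfsA rows cols b q = markSet b (RS rows cols b q) := by
  intro n
  induction n with
  | zero =>
    intro b q hn hq
    match q with
    | [] =>
      rw [bfsA]
      rw [markSet_false]
      rintro p ⟨s, hs, _⟩
      simp at hs
    | _ :: _ => simp at hn
  | succ n ihn =>
    intro b q hn hq
    match q with
    | [] =>
      rw [bfsA]
      rw [markSet_false]
      rintro p ⟨s, hs, _⟩
      simp at hs
    | (x, y) :: rest =>
      rw [bfsA]
      obtain ⟨C1, C2, C3, C4, C5⟩ := innerA rows cols x y dirs (fun d h => h) b []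
        (hq (x, y) List.mem_cons_self) (by simp)
      obtain ⟨ex, hex, hones⟩ := tryA_ones rows cols x y dirs b []
      simp only [List.nil_append] at hex
      have hrec : bfsA rows cols (dirs.foldl (tryA rows cols x y) (b, [])).1
          (rest ++ (dirs.foldl (tryA rows cols x y) (b, [])).2) =
          markSet (dirs.foldl (tryA rows cols x y) (b, [])).1
            (RS rows cols (dirs.foldl (tryA rows cols x y) (b, [])).1
              (rest ++ (dirs.foldl (tryA rows cols x y) (b, [])).2)) := by
        apply ihn
        · rw [hex]
          simp only [List.length_append, List.length_cons] at hn ⊢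
          omega
        · intro p hp
          rcases List.mem_append.mp hp with hp | hp
          · exact C2 p (hq p (List.mem_cons_of_mem _ hp))
          · exact C4 p hp
      rw [hrec]
      have hno : ∀ cc, Nbr (x, y) cc → cc.1 < rows → cc.2 < cols →
          vAt (dirs.foldl (tryA rows cols x y) (b, [])).1 cc ≠ 1 := by
        intro cc hnb hc1 hc2
        obtain ⟨d, hd, g1, g2, g3, g4, hcc⟩ := nbr_cand rows cols x y cc hnb hc1 hc2
        rw [← hcc]
        exact C5 d hd g1 g2 g3 g4
      have hterm := RS_terminal rows cols (dirs.foldl (tryA rows cols x y) (b, [])).1 (x, y)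
        (rest ++ (dirs.foldl (tryA rows cols x y) (b, [])).2) hno
      have hdrop : markSet (dirs.foldl (tryA rows cols x y) (b, [])).1
          (RS rows cols (dirs.foldl (tryA rows cols x y) (b, [])).1
            (rest ++ (dirs.foldl (tryA rows cols x y) (b, [])).2)) =
          markSet (dirs.foldl (tryA rows cols x y) (b, [])).1
            (RS rows cols (dirs.foldl (tryA rows cols x y) (b, [])).1
              ((x, y) :: (rest ++ (dirs.foldl (tryA rows cols x y) (b, [])).2))) := by
        rw [markSet_congr _ _ _ hterm]
        rw [markSet_drop _ (x, y) _ (C2 (x, y) (hq (x, y) List.mem_cons_self))]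
      rw [hdrop]
      have := C1 ((x, y) :: rest) List.mem_cons_self
      simp only [List.append_nil] at this
      rw [← List.cons_append]
      exact this


-- ---------- seeding characterization (A) ----------

theorem mem_allPairs (rows cols : Nat) (p : Nat × Nat) :
    p ∈ allPairs rows cols ↔ p.1 < rows ∧ p.2 < cols := by
  unfold allPairs
  simp [List.mem_flatMap, List.mem_range]
  constructor
  · rintro ⟨i, hi, j, hj, rfl⟩; exact ⟨hi, hj⟩
  · rintro ⟨h1, h2⟩; exact ⟨p.1, h1, p.2, h2, rfl⟩

theorem allPairs_nodup (rows cols : Nat) : (allPairs rows cols).Nodup := by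
  unfold allPairs
  rw [List.nodup_flatMap]
  constructor
  · intro i _
    exact (List.nodup_range).map (fun a b h => by simpa using congrArg Prod.snd h)
  · apply List.Pairwise.imp ?_ (List.pairwise_lt_range)
    intro a b hab
    intro q hqa hqb
    simp only [List.mem_map, List.mem_range] at hqa hqb
    obtain ⟨j1, _, rfl⟩ := hqa
    obtain ⟨j2, _, h2⟩ := hqb
    have := congrArg Prod.fst h2
    simp at this
    omega

def seedPred (rows cols : Nat) (b0 : List (List Int)) (p : Nat × Nat) : Bool :=
  !(decide (0 < p.2 ∧ p.2 < cols - 1 ∧ 0 < p.1 ∧ p.1 < rows - 1)) && decide (vAt b0 p = 1)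

theorem seedA_spec (rows cols : Nat) (b0 : List (List Int)) :
    ∀ (l : List (Nat × Nat)), l.Nodup → ∀ (T q0 : List (Nat × Nat)), (∀ p ∈ l, p ∉ T) →
      seedA rows cols l (markSet b0 (fun p => p ∈ T), q0) =
        (markSet b0 (fun p => p ∈ T ++ l.filter (seedPred rows cols b0)),
         q0 ++ l.filter (seedPred rows cols b0)) := by
  intro l
  induction l with
  | nil =>
    intro _ T q0 _
    unfold seedA
    simp
  | cons p l ih =>
    intro hnd T q0 hT
    have hpT : p ∉ T := hT p List.mem_cons_self
    have hvp : vAt (markSet b0 (fun q => q ∈ T)) p = vAt b0 p := by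
      rw [vAt_eq_cell?, cell?_markSet, vAt_eq_cell?]
      cases hc : cell? b0 p <;> simp [hpT]
    unfold seedA
    simp only [List.foldl_cons]
    by_cases hin : 0 < p.2 ∧ p.2 < cols - 1 ∧ 0 < p.1 ∧ p.1 < rows - 1
    · rw [if_pos hin]
      have hpred : seedPred rows cols b0 p = false := by
        unfold seedPred
        simp [hin]
      rw [List.filter_cons_of_neg (by simp [hpred])]
      exact ih (List.Nodup.of_cons hnd) T q0 (fun q hq => hT q (List.mem_cons_of_mem p hq))
    · rw [if_neg hin]
      by_cases h1 : vAt b0 p = 1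
      · rw [if_pos (by rw [hvp]; exact h1)]
        have hpred : seedPred rows cols b0 p = true := by
          unfold seedPred
          simp [hin, h1]
        rw [List.filter_cons_of_pos (by simp [hpred])]
        have hmark : mark1 (markSet b0 (fun q => q ∈ T)) p (-1) =
            markSet b0 (fun q => q ∈ T ++ [p]) := (markSet_snoc b0 T p).symm
        rw [hmark]
        have := ih (List.Nodup.of_cons hnd) (T ++ [p]) (q0 ++ [p]) (by
          intro q hq
          simp only [List.mem_append, List.mem_singleton]
          rintro (hqT | rfl)
          · exact hT q (List.mem_cons_of_mem p hq) hqT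
          · exact (List.nodup_cons.mp hnd).1 hq)
        unfold seedA at this
        rw [this]
        have hl1 : (T ++ [p]) ++ List.filter (seedPred rows cols b0) l =
            T ++ p :: List.filter (seedPred rows cols b0) l := by simp
        have hl2 : (q0 ++ [p]) ++ List.filter (seedPred rows cols b0) l =
            q0 ++ p :: List.filter (seedPred rows cols b0) l := by simp
        rw [hl1, hl2]
      · rw [if_neg (by rw [hvp]; exact h1)]
        have hpred : seedPred rows cols b0 p = false := by
          unfold seedPred
          simp [h1]
        rw [List.filter_cons_of_neg (by simp [hpred])]
        exact ih (List.Nodup.of_cons hnd) T q0 (fun q hq => hT q (List.mem_cons_of_mem p hq))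


-- ---------- final relabel pass (A) ----------

def relabel (v : Int) : Int := if v = 1 then 0 else if v = -1 then 1 else v

noncomputable def relMap (b : List (List Int)) (S : Nat × Nat → Prop) : List (List Int) :=
  b.mapIdx (fun i row => row.mapIdx (fun j v =>
    @ite _ (S (i, j)) (Classical.propDecidable _) (relabel v) v))

theorem shape_relMap (b : List (List Int)) (S : Nat × Nat → Prop) (i : Nat) :
    ((relMap b S)[i]?).map List.length = (b[i]?).map List.length := by
  unfold relMap
  rw [List.getElem?_mapIdx]
  cases h : b[i]? <;> simp

theorem cell?_relMap (b : List (List Int)) (S : Nat × Nat → Prop) (q : Nat × Nat) :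
    cell? (relMap b S) q =
      (cell? b q).map (fun w => @ite _ (S q) (Classical.propDecidable _) (relabel w) w) := by
  unfold cell? relMap
  rw [List.getElem?_mapIdx]
  cases h : b[q.1]? with
  | none => simp
  | some r =>
    simp only [Option.map_some, Option.bind_some, List.getElem?_mapIdx]

theorem relMap_false (b : List (List Int)) (S : Nat × Nat → Prop) (h : ∀ p, ¬ S p) :
    relMap b S = b := by
  apply board_ext
  · exact shape_relMap b S
  · intro q
    rw [cell?_relMap]
    cases hc : cell? b q with
    | none => simp
    | some w => simp [h q]

theorem relMap_congr (b : List (List Int)) (S T : Nat × Nat → Prop)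
    (h : ∀ p, S p ↔ T p) : relMap b S = relMap b T := by
  have : S = T := funext (fun p => propext (h p))
  rw [this]

theorem finStep (b : List (List Int)) (p : Nat × Nat) :
    (if vAt (if vAt b p = 1 then mark1 b p 0 else b) p = -1
      then mark1 (if vAt b p = 1 then mark1 b p 0 else b) p 1
      else (if vAt b p = 1 then mark1 b p 0 else b)) = relMap b (fun q => q = p) := by
  by_cases h0 : vAt b p = 0
  · have e1 : (if vAt b p = 1 then mark1 b p 0 else b) = b := by
      rw [if_neg (show ¬ vAt b p = 1 by rw [h0]; decide)]
    rw [e1, if_neg (show ¬ vAt b p = -1 by rw [h0]; decide)]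
    apply Eq.symm
    apply board_ext
    · exact shape_relMap b _
    · intro q
      rw [cell?_relMap]
      by_cases hq : q = p
      · subst hq
        cases hcq : cell? b q with
        | none => simp
        | some w =>
          have : vAt b q = w := by rw [vAt_eq_cell?, hcq]; rfl
          rw [this] at h0; subst h0
          simp [relabel]
      · cases hcq : cell? b q <;> simp [hq]
  · have hcp : cell? b p = some (vAt b p) := cell?_isSome_of_vAt_ne b p h0
    by_cases h1 : vAt b p = 1
    · rw [if_pos h1]
      have hv0 : vAt (mark1 b p 0) p = 0 := vAt_mark1_self b p 0 h0
      rw [if_neg (by rw [hv0]; decide)]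
      apply Eq.symm
      apply board_ext
      · intro i; rw [shape_relMap, shape_mark1]
      · intro q
        rw [cell?_relMap, cell?_mark1]
        by_cases hq : q = p
        · subst hq
          rw [if_pos rfl, hcp, h1]
          simp [relabel]
        · rw [if_neg (fun e => hq e.symm)]
          cases hcq : cell? b q <;> simp [hq]
    · rw [if_neg h1]
      by_cases h2 : vAt b p = -1
      · rw [if_pos h2]
        apply Eq.symm
        apply board_ext
        · intro i; rw [shape_relMap, shape_mark1]
        · intro q
          rw [cell?_relMap, cell?_mark1]
          by_cases hq : q = p
          · subst hq
            rw [if_pos rfl, hcp, h2]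
            simp [relabel]
          · rw [if_neg (fun e => hq e.symm)]
            cases hcq : cell? b q <;> simp [hq]
      · rw [if_neg h2]
        apply Eq.symm
        apply board_ext
        · exact shape_relMap b _
        · intro q
          rw [cell?_relMap]
          by_cases hq : q = p
          · subst hq
            rw [hcp]
            simp only [Option.map_some]
            have hrel : relabel (vAt b q) = vAt b q := by
              unfold relabel; rw [if_neg h1, if_neg h2]
            simp [hrel]
          · cases hcq : cell? b q <;> simp [hq]

theorem relMap_relMap (b : List (List Int)) (p : Nat × Nat) (S : Nat × Nat → Prop)
    (hp : ¬ S p) :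
    relMap (relMap b (fun q => q = p)) S = relMap b (fun q => q = p ∨ S q) := by
  apply board_ext
  · intro i; rw [shape_relMap, shape_relMap, shape_relMap]
  · intro q
    rw [cell?_relMap, cell?_relMap, cell?_relMap]
    cases hcq : cell? b q with
    | none => simp
    | some w =>
      simp only [Option.map_some, Option.some.injEq]
      by_cases hq : q = p
      · subst hq
        simp [hp]
      · by_cases hS : S q <;> simp [hq, hS]

theorem finA_fold :
    ∀ (l : List (Nat × Nat)), l.Nodup → ∀ (b : List (List Int)),
      l.foldl (fun b p =>
        let b1 := if vAt b p = 1 then mark1 b p 0 else b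
        if vAt b1 p = -1 then mark1 b1 p 1 else b1) b = relMap b (fun q => q ∈ l) := by
  intro l
  induction l with
  | nil =>
    intro _ b
    rw [List.foldl_nil, relMap_false]
    simp
  | cons p l ih =>
    intro hnd b
    rw [List.foldl_cons]
    simp only []
    rw [finStep b p]
    rw [ih (List.Nodup.of_cons hnd) (relMap b (fun q => q = p))]
    rw [relMap_relMap b p _ (fun hm => (List.nodup_cons.mp hnd).1 hm)]
    apply relMap_congr
    intro q
    simp only [List.mem_cons]




-- ---------- stack-DFS characterization (B) ----------

theorem mark1_eq_markSet (b : List (List Int)) (cn : Nat × Nat) :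
    mark1 b cn (-1) = markSet b (fun p => p = cn) := by
  have h := markSet_snoc b [] cn
  rw [markSet_false b (fun p => p ∈ ([] : List (Nat × Nat))) (by simp)] at h
  rw [← h]
  apply markSet_congr
  intro p
  simp

-- a cell is on the stack with valid coordinates and value 1
abbrev GoodC (rows cols : Nat) (b : List (List Int)) (c : Int × Int) : Prop :=
  0 ≤ c.1 ∧ c.1 < (rows : Int) ∧ 0 ≤ c.2 ∧ c.2 < (cols : Int) ∧
  vAt b (c.1.toNat, c.2.toNat) = 1

-- cells the remaining stack will still mark
abbrev SbS (rows cols : Nat) (b : List (List Int)) (stack : List (Int × Int))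
    (d : Nat × Nat) : Prop :=
  ∃ c ∈ stack, GoodC rows cols b c ∧ Rch rows cols b (c.1.toNat, c.2.toNat) d

theorem Rch_pop (rows cols : Nat) (b : List (List Int)) (cn : Nat × Nat) {d : Nat × Nat}
    (h : Rch rows cols b cn d) :
    d = cn ∨ ∃ e, Nbr cn e ∧ e.1 < rows ∧ e.2 < cols ∧ vAt (mark1 b cn (-1)) e = 1 ∧
      Rch rows cols (mark1 b cn (-1)) e d := by
  induction h with
  | refl => exact Or.inl rfl
  | @step q r hq hnbr hb1 hb2 hv ih =>
    by_cases hrc : r = cn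
    · exact Or.inl hrc
    · have hv' : vAt (mark1 b cn (-1)) r = 1 := by
        rw [vAt_mark1_ne b cn _ r hrc]; exact hv
      rcases ih with rfl | ⟨e, he1, he2, he3, he4, he5⟩
      · exact Or.inr ⟨r, hnbr, hb1, hb2, hv', Rch.refl⟩
      · exact Or.inr ⟨e, he1, he2, he3, he4, Rch.step he5 hnbr hb1 hb2 hv'⟩

theorem pushes_sound (rows cols : Nat) (c : Int × Int) (h0 : 0 ≤ c.1) (h2 : 0 ≤ c.2)
    (s : Int × Int)
    (hs : s ∈ [(c.1, c.2 - 1), (c.1, c.2 + 1), (c.1 - 1, c.2), (c.1 + 1, c.2)])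
    (hb : 0 ≤ s.1 ∧ s.1 < (rows : Int) ∧ 0 ≤ s.2 ∧ s.2 < (cols : Int)) :
    Nbr (c.1.toNat, c.2.toNat) (s.1.toNat, s.2.toNat) := by
  simp only [List.mem_cons, List.not_mem_nil, or_false] at hs
  obtain ⟨hb1, hb2, hb3, hb4⟩ := hb
  unfold Nbr
  rcases hs with rfl | rfl | rfl | rfl <;> dsimp only at * <;> omega

theorem pushes_complete (rows cols : Nat) (c : Int × Int) (h0 : 0 ≤ c.1) (h2 : 0 ≤ c.2)
    (e : Nat × Nat) (hnb : Nbr (c.1.toNat, c.2.toNat) e) (he1 : e.1 < rows) (he2 : e.2 < cols) :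
    ∃ s ∈ [(c.1, c.2 - 1), (c.1, c.2 + 1), (c.1 - 1, c.2), (c.1 + 1, c.2)],
      (s.1.toNat, s.2.toNat) = e ∧ 0 ≤ s.1 ∧ s.1 < (rows : Int) ∧ 0 ≤ s.2 ∧
      s.2 < (cols : Int) := by
  unfold Nbr at hnb
  rcases hnb with ⟨ha, hb⟩ | ⟨ha, hb⟩ | ⟨ha, hb⟩ | ⟨ha, hb⟩
  · exact ⟨(c.1 + 1, c.2), by simp,
      Prod.ext (by simp; omega) (by simp; omega), by omega, by omega, by omega, by omega⟩
  · exact ⟨(c.1 - 1, c.2), by simp,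
      Prod.ext (by simp; omega) (by simp; omega), by omega, by omega, by omega, by omega⟩
  · exact ⟨(c.1, c.2 + 1), by simp,
      Prod.ext (by simp; omega) (by simp; omega), by omega, by omega, by omega, by omega⟩
  · exact ⟨(c.1, c.2 - 1), by simp,
      Prod.ext (by simp; omega) (by simp; omega), by omega, by omega, by omega, by omega⟩

theorem fillLoop_spec (rows cols : Nat) :
    ∀ (n : Nat) (b : List (List Int)) (stack : List (Int × Int)),
      5 * onesCount b + stack.length ≤ n →
      fillLoop rows cols b stack = markSet b (SbS rows cols b stack) := by
  intro n
  induction n with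
  | zero =>
    intro b stack hn
    match stack with
    | [] =>
      rw [fillLoop, markSet_false]
      rintro p ⟨c, hc, _⟩
      simp at hc
    | _ :: _ => simp at hn
  | succ n ihn =>
    intro b stack hn
    match stack with
    | [] =>
      rw [fillLoop, markSet_false]
      rintro p ⟨c, hc, _⟩
      simp at hc
    | c :: rest =>
      rw [fillLoop]
      by_cases hg : 0 ≤ c.1 ∧ c.1 < (rows : Int) ∧ 0 ≤ c.2 ∧ c.2 < (cols : Int) ∧
          vAt b (c.1.toNat, c.2.toNat) = 1
      · rw [dif_pos hg]
        have hv : vAt b (c.1.toNat, c.2.toNat) = 1 := hg.2.2.2.2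
        have hones := ones_mark1 b (c.1.toNat, c.2.toNat) hv
        have hrec := ihn (mark1 b (c.1.toNat, c.2.toNat) (-1))
          ([(c.1, c.2 - 1), (c.1, c.2 + 1), (c.1 - 1, c.2), (c.1 + 1, c.2)] ++ rest)
          (by
            simp only [List.length_append, List.length_cons, List.length_nil] at hn ⊢
            omega)
        rw [hrec]
        have hmono : ∀ p, vAt (mark1 b (c.1.toNat, c.2.toNat) (-1)) p = 1 → vAt b p = 1 :=
          fun p hp => ((ones_mark1_iff b _ p).mp hp).1
        -- cells marked from a push correspond to cells reached from c
        have hfrom : ∀ d', Rch rows cols b (c.1.toNat, c.2.toNat) d' →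
            (d' = (c.1.toNat, c.2.toNat) ∨
              ∃ s ∈ [(c.1, c.2 - 1), (c.1, c.2 + 1), (c.1 - 1, c.2), (c.1 + 1, c.2)],
                GoodC rows cols (mark1 b (c.1.toNat, c.2.toNat) (-1)) s ∧
                Rch rows cols (mark1 b (c.1.toNat, c.2.toNat) (-1)) (s.1.toNat, s.2.toNat) d') := by
          intro d' hr
          rcases Rch_pop rows cols b (c.1.toNat, c.2.toNat) hr with h | ⟨e, he1, he2, he3, he4, he5⟩
          · exact Or.inl h
          · obtain ⟨s, hsmem, hse, hs1, hs2, hs3, hs4⟩ :=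
              pushes_complete rows cols c hg.1 hg.2.2.1 e he1 he2 he3
            exact Or.inr ⟨s, hsmem, ⟨hs1, hs2, hs3, hs4, by rw [hse]; exact he4⟩,
              by rw [hse]; exact he5⟩
        rw [mark1_eq_markSet b (c.1.toNat, c.2.toNat), markSet_markSet]
        apply markSet_congr
        intro d
        rw [← mark1_eq_markSet b (c.1.toNat, c.2.toNat)]
        constructor
        · rintro (⟨s, hsmem, hgood', hr'⟩ | rfl)
          · have hgood : GoodC rows cols b s :=
              ⟨hgood'.1, hgood'.2.1, hgood'.2.2.1, hgood'.2.2.2.1, hmono _ hgood'.2.2.2.2⟩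
            have hr : Rch rows cols b (s.1.toNat, s.2.toNat) d :=
              Rch_mono rows cols b _ hmono hr'
            rcases List.mem_append.mp hsmem with hp | hp
            · have hnbr : Nbr (c.1.toNat, c.2.toNat) (s.1.toNat, s.2.toNat) :=
                pushes_sound rows cols c hg.1 hg.2.2.1 s hp
                  ⟨hgood'.1, hgood'.2.1, hgood'.2.2.1, hgood'.2.2.2.1⟩
              have hb1 : s.1.toNat < rows := by omega
              have hb2 : s.2.toNat < cols := by omega
              exact ⟨c, List.mem_cons_self, hg,
                Rch_trans rows cols b (Rch.step Rch.refl hnbr hb1 hb2 hgood.2.2.2.2) hr⟩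
            · exact ⟨s, List.mem_cons_of_mem c hp, hgood, hr⟩
          · exact ⟨c, List.mem_cons_self, hg, Rch.refl⟩
        · rintro ⟨s, hsmem, hgood, hr⟩
          rcases List.mem_cons.mp hsmem with rfl | hp
          · rcases hfrom d hr with h | ⟨s', hs', hg', hr'⟩
            · exact Or.inr h
            · exact Or.inl ⟨s', List.mem_append.mpr (Or.inl hs'), hg', hr'⟩
          · by_cases hsc : (s.1.toNat, s.2.toNat) = (c.1.toNat, c.2.toNat)
            · rcases hfrom d (by rw [← hsc]; exact hr) with h | ⟨s', hs', hg', hr'⟩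
              · exact Or.inr h
              · exact Or.inl ⟨s', List.mem_append.mpr (Or.inl hs'), hg', hr'⟩
            · have hgood' : GoodC rows cols (mark1 b (c.1.toNat, c.2.toNat) (-1)) s :=
                ⟨hgood.1, hgood.2.1, hgood.2.2.1, hgood.2.2.2.1,
                  by rw [vAt_mark1_ne b _ _ _ hsc]; exact hgood.2.2.2.2⟩
              rcases Rch_block rows cols b (mark1 b (c.1.toNat, c.2.toNat) (-1))
                (c.1.toNat, c.2.toNat)
                (fun p hpc hp1 => by rw [vAt_mark1_ne b _ _ _ hpc]; exact hp1) hr with h | h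
              · exact Or.inl ⟨s, List.mem_append.mpr (Or.inr hp), hgood', h⟩
              · rcases Rch_first rows cols _ h with rfl | ⟨e, he1, he2, he3, he4, he5⟩
                · exact Or.inr rfl
                · obtain ⟨s', hs'mem, hse, hs1, hs2, hs3, hs4⟩ :=
                    pushes_complete rows cols c hg.1 hg.2.2.1 e he1 he2 he3
                  exact Or.inl ⟨s', List.mem_append.mpr (Or.inl hs'mem),
                    ⟨hs1, hs2, hs3, hs4, by rw [hse]; exact he4⟩, by rw [hse]; exact he5⟩
      · rw [dif_neg hg]
        have hrec := ihn b rest (by simp only [List.length_cons] at hn; omega)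
        rw [hrec]
        apply markSet_congr
        intro d
        constructor
        · rintro ⟨s, hs, h2, h3⟩
          exact ⟨s, List.mem_cons_of_mem c hs, h2, h3⟩
        · rintro ⟨s, hs, h2, h3⟩
          rcases List.mem_cons.mp hs with rfl | hs
          · exact absurd h2 hg
          · exact ⟨s, hs, h2, h3⟩


-- ---------- the seeds mark exactly A's border-connected set ----------

theorem mem_borderSeeds (rows cols : Nat) (c : Int × Int) :
    c ∈ borderSeeds rows cols ↔
      0 ≤ c.1 ∧ c.1 < (rows : Int) ∧ 0 ≤ c.2 ∧ c.2 < (cols : Int) ∧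
      (c.1 = 0 ∨ c.1 = (rows : Int) - 1 ∨ c.2 = 0 ∨ c.2 = (cols : Int) - 1) := by
  unfold borderSeeds
  simp only [List.mem_flatMap, PySem.List.mem_pyRange_one]
  constructor
  · rintro ⟨i, hi, j, hj, hc⟩
    by_cases hbord : i = 0 ∨ i = (rows : Int) - 1 ∨ j = 0 ∨ j = (cols : Int) - 1
    · rw [if_pos hbord] at hc
      have : c = (i, j) := by simpa using hc
      subst this
      exact ⟨hi.1, hi.2, hj.1, hj.2, hbord⟩
    · rw [if_neg hbord] at hc
      simp at hc
  · rintro ⟨h1, h2, h3, h4, h5⟩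
    refine ⟨c.1, ⟨h1, h2⟩, c.2, ⟨h3, h4⟩, ?_⟩
    rw [if_pos h5]
    simp

theorem mem_sl_iff (rows cols : Nat) (board : List (List Int)) (q : Nat × Nat) :
    q ∈ (allPairs rows cols).filter (seedPred rows cols board) ↔
      q.1 < rows ∧ q.2 < cols ∧
      ¬(0 < q.2 ∧ q.2 < cols - 1 ∧ 0 < q.1 ∧ q.1 < rows - 1) ∧ vAt board q = 1 := by
  rw [List.mem_filter, mem_allPairs]
  unfold seedPred
  simp only [Bool.and_eq_true, Bool.not_eq_eq_eq_not, Bool.not_true, decide_eq_true_eq,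
    decide_eq_false_iff_not]
  tauto

theorem seeds_iff_sl (rows cols : Nat) (board : List (List Int)) (d : Nat × Nat) :
    SbS rows cols board (borderSeeds rows cols) d ↔
      ∃ s ∈ (allPairs rows cols).filter (seedPred rows cols board),
        Rch rows cols board s d := by
  constructor
  · rintro ⟨c, hc, hgood, hr⟩
    have hb := (mem_borderSeeds rows cols c).mp hc
    refine ⟨(c.1.toNat, c.2.toNat), ?_, hr⟩
    rw [mem_sl_iff]
    exact ⟨by omega, by omega, by omega, hgood.2.2.2.2⟩
  · rintro ⟨s, hs, hr⟩
    rw [mem_sl_iff] at hs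
    obtain ⟨h1, h2, h3, h4⟩ := hs
    have heq : (((s.1 : Int)).toNat, ((s.2 : Int)).toNat) = s := by
      apply Prod.ext <;> simp
    refine ⟨((s.1 : Int), (s.2 : Int)), ?_, ?_, ?_⟩
    · rw [mem_borderSeeds]
      refine ⟨by omega, by omega, by omega, by omega, by omega⟩
    · refine ⟨by omega, by omega, by omega, by omega, ?_⟩
      simp only []
      rw [heq]
      exact h4
    · simp only []
      rw [heq]
      exact hr

theorem reach_iff_K (rows cols : Nat) (board : List (List Int))
    (sl : List (Nat × Nat)) (d : Nat × Nat) :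
    (∃ s ∈ sl, Rch rows cols board s d) ↔
      (RS rows cols (markSet board (fun p => p ∈ sl)) sl d ∨ d ∈ sl) := by
  constructor
  · rintro ⟨s, hs, hr⟩
    induction hr with
    | refl => exact Or.inr hs
    | @step q r h1 h2 h3 h4 h5 ih =>
      by_cases hrsl : r ∈ sl
      · exact Or.inr hrsl
      · have hm : vAt (markSet board (fun p => p ∈ sl)) r = 1 :=
          (ones_markSet board _ r).mpr ⟨h5, hrsl⟩
        rcases ih with ⟨s0, hs0, p0⟩ | hq
        · exact Or.inl ⟨s0, hs0, Rch.step p0 h2 h3 h4 hm⟩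
        · exact Or.inl ⟨q, hq, Rch.step Rch.refl h2 h3 h4 hm⟩
  · rintro (⟨s, hs, hr⟩ | hd)
    · exact ⟨s, hs,
        Rch_mono rows cols board _ (fun p hp => ((ones_markSet board _ p).mp hp).1) hr⟩
    · exact ⟨d, hd, Rch.refl⟩


-- ---------- the sweep is A's relabel on columns < cols ----------

theorem sweepFold_length (l : List Nat) :
    ∀ (row : List Int),
      (l.foldl (fun r j => if r.getD j 0 = 1 then r.set j 0
        else if r.getD j 0 = -1 then r.set j 1 else r) row).length = row.length := by
  induction l with
  | nil => intro row; rfl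
  | cons a l ih =>
    intro row
    rw [List.foldl_cons, ih]
    split_ifs <;> simp [List.length_set]

theorem sweepStep_getElem? (row : List Int) (a j : Nat) :
    (if row.getD a 0 = 1 then row.set a 0
      else if row.getD a 0 = -1 then row.set a 1 else row)[j]? =
      if j = a then (row[a]?).map relabel else row[j]? := by
  have hgd : row.getD a 0 = (row[a]?).getD 0 := by rw [List.getD_eq_getElem?_getD]
  by_cases hja : j = a
  · subst hja
    rw [if_pos rfl]
    cases ha : row[j]? with
    | none =>
      have hlen : row.length ≤ j := by
        by_contra hc
        rw [List.getElem?_eq_getElem (by omega)] at ha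
        simp at ha
      rw [hgd, ha]
      simp only [Option.getD_none, Option.map_none]
      rw [if_neg (by decide), if_neg (by decide)]
      exact ha
    | some v =>
      have hlen : j < row.length := by
        by_contra hc
        rw [List.getElem?_eq_none (by omega)] at ha
        simp at ha
      rw [hgd, ha]
      simp only [Option.getD_some, Option.map_some]
      by_cases h1 : v = 1
      · subst h1
        rw [if_pos rfl, List.getElem?_set_eq_of_lt _ hlen]
        simp [relabel]
      · rw [if_neg h1]
        by_cases h2 : v = -1
        · subst h2
          rw [if_pos rfl, List.getElem?_set_eq_of_lt _ hlen]
          simp [relabel, h1]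
        · rw [if_neg h2, ha]
          simp [relabel, h1, h2]
  · rw [if_neg hja]
    split_ifs
    · rw [List.getElem?_set_ne (fun e => hja e.symm)]
    · rw [List.getElem?_set_ne (fun e => hja e.symm)]
    · rfl

theorem sweepFold_getElem? (l : List Nat) :
    ∀ (row : List Int) (j : Nat), l.Nodup →
      (l.foldl (fun r j0 => if r.getD j0 0 = 1 then r.set j0 0
        else if r.getD j0 0 = -1 then r.set j0 1 else r) row)[j]? =
      if j ∈ l then (row[j]?).map relabel else row[j]? := by
  induction l with
  | nil => intro row j _; simp
  | cons a l ih =>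
    intro row j hnd
    rw [List.foldl_cons, ih _ j (List.Nodup.of_cons hnd)]
    by_cases hja : j = a
    · subst hja
      have hnl : j ∉ l := (List.nodup_cons.mp hnd).1
      rw [if_neg hnl, if_pos List.mem_cons_self, sweepStep_getElem?, if_pos rfl]
    · have hstep := sweepStep_getElem? row a j
      rw [if_neg hja] at hstep
      rw [hstep]
      by_cases hjl : j ∈ l
      · rw [if_pos hjl, if_pos (List.mem_cons_of_mem a hjl)]
      · rw [if_neg hjl, if_neg (show j ∉ a :: l by simp [hja, hjl])]

theorem sweepRow_getElem? (cols : Nat) (row : List Int) (j : Nat) :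
    (sweepRow cols row)[j]? = (row[j]?).map (fun v => if j < cols then relabel v else v) := by
  unfold sweepRow
  rw [sweepFold_getElem? (List.range cols) row j List.nodup_range]
  by_cases hj : j < cols
  · rw [if_pos (List.mem_range.mpr hj)]
    cases row[j]? <;> simp [hj]
  · rw [if_neg (fun hm => hj (List.mem_range.mp hm))]
    cases row[j]? <;> simp [hj]

theorem cell?_mapSweep (cols : Nat) (b : List (List Int)) (q : Nat × Nat) :
    cell? (b.map (sweepRow cols)) q =
      (cell? b q).map (fun v => if q.2 < cols then relabel v else v) := by
  unfold cell?
  rw [List.getElem?_map]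
  cases h : b[q.1]? with
  | none => simp
  | some row =>
    simp only [Option.map_some, Option.bind_some, sweepRow_getElem?]

theorem shape_mapSweep (cols : Nat) (b : List (List Int)) (i : Nat) :
    ((b.map (sweepRow cols))[i]?).map List.length = (b[i]?).map List.length := by
  rw [List.getElem?_map]
  cases h : b[i]? with
  | none => rfl
  | some row =>
    simp only [Option.map_some, Option.some.injEq]
    unfold sweepRow
    exact sweepFold_length (List.range cols) row

theorem length_markSet (b : List (List Int)) (S : Nat × Nat → Prop) :
    (markSet b S).length = b.length := by
  unfold markSet
  rw [List.length_mapIdx]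


-- ---------- assembly ----------

theorem solve_eq_spec : ∀ (board : List (List Int)), Pre_solve board →
    solve board = solve_alt board := by
  intro board _
  set rows := board.length with hrows
  set cols := board.headI.length with hcols
  set sl := (allPairs rows cols).filter (seedPred rows cols board) with hsl
  -- A's seeding
  have hseed0 : markSet board (fun p => p ∈ ([] : List (Nat × Nat))) = board :=
    markSet_false _ _ (by simp)
  have hseedA := seedA_spec rows cols board (allPairs rows cols) (allPairs_nodup rows cols)
    [] [] (by simp)
  rw [hseed0] at hseedA
  simp only [List.nil_append] at hseedA
  have hsl1 : ∀ p ∈ sl, vAt board p = 1 := by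
    intro p hp
    have := List.of_mem_filter hp
    unfold seedPred at this
    simp only [Bool.and_eq_true, decide_eq_true_eq] at this
    exact this.2
  have hmarked : ∀ p ∈ sl, vAt (markSet board (fun q => q ∈ sl)) p = -1 := by
    intro p hp
    exact vAt_markSet_mem board _ p hp (by rw [hsl1 p hp]; decide)
  -- A's BFS
  have hbfs := bfsA_spec rows cols
    (5 * onesCount (markSet board (fun q => q ∈ sl)) + sl.length)
    (markSet board (fun q => q ∈ sl)) sl (le_refl _) hmarked
  -- B's stack DFS
  have hfill := fillLoop_spec rows cols
    (5 * onesCount board + (borderSeeds rows cols).reverse.length) board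
    (borderSeeds rows cols).reverse (le_refl _)
  have hKiff : ∀ d, SbS rows cols board (borderSeeds rows cols).reverse d ↔
      (RS rows cols (markSet board (fun p => p ∈ sl)) sl d ∨ d ∈ sl) := by
    intro d
    rw [← reach_iff_K rows cols board sl d, ← seeds_iff_sl rows cols board d]
    constructor
    · rintro ⟨c, hc, h2, h3⟩
      exact ⟨c, List.mem_reverse.mp hc, h2, h3⟩
    · rintro ⟨c, hc, h2, h3⟩
      exact ⟨c, List.mem_reverse.mpr hc, h2, h3⟩
  -- unfold both programs
  unfold solve solve_alt
  simp only []
  rw [hseedA]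
  simp only []
  rw [hbfs, markSet_markSet]
  unfold finA
  rw [finA_fold (allPairs rows cols) (allPairs_nodup rows cols)]
  rw [hfill]
  rw [markSet_congr board _ _ hKiff]
  -- both boards now relabel the SAME marked grid; A on cells of allPairs, B on columns < cols
  apply board_ext
  · intro i
    rw [shape_relMap, shape_mapSweep, shape_markSet]
  · intro q
    rw [cell?_relMap, cell?_mapSweep]
    cases hM : cell? (markSet board
        (fun p => RS rows cols (markSet board (fun q => q ∈ sl)) sl p ∨ p ∈ sl)) q with
    | none => simp
    | some w =>
      simp only [Option.map_some, Option.some.injEq]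
      have hq1 : q.1 < rows := by
        by_contra hc
        unfold cell? at hM
        rw [List.getElem?_eq_none (by rw [length_markSet]; omega)] at hM
        simp at hM
      by_cases h2 : q.2 < cols
      · rw [if_pos ((mem_allPairs rows cols q).mpr ⟨hq1, h2⟩), if_pos h2]
      · rw [if_neg (fun hm => h2 ((mem_allPairs rows cols q).mp hm).2), if_neg h2]

-- ===== VERDICT (by name: the statement is the Claim_ definition above) =====
theorem solve_spec : Claim_equal_solve := by
  intro board _ hPre
  unfold Spec_solve
  exact solve_eq_spec board hPre
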